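-- pv_equiv track=rewrite | github.com/thought-yyds/Fair | backend/app/services/memory_service.py | _format_messages_for_prompt
-- ===== SOURCE A (Python) =====
-- from typing import List, Optional, Dict, Any, Tuple
--
-- def _format_messages_for_prompt(messages: List[Tuple[str, str]], max_chars: int = 2000) -> str:
--     """将消息列表格式化为用于摘要的文本，限制长度"""
--     lines: List[str] = []
--     length = 0
--     for role, content in messages:
--         line = f"{role}: {content}"
--         if length + len(line) > max_chars:
--             break
--         lines.append(line)
--         length += len(line)
--     return "\n".join(lines)
-- ===== SOURCE B (Python) =====
-- from itertools import accumulate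
-- from typing import List, Tuple
--
-- def _format_messages_for_prompt(messages: List[Tuple[str, str]], max_chars: int = 2000) -> str:
--     lines = [f"{role}: {content}" for role, content in messages]
--     totals = list(accumulate(map(len, lines)))
--     cutoff = next((i for i, t in enumerate(totals) if t > max_chars), len(lines))
--     return "\n".join(lines[:cutoff])
-- ===== Notes on version B (the rewrite author's own statement) =====
-- stated objective: alternative
-- what changed: Replaces the interleaved accumulate-and-break loop by three separate passes: format all lines, tabulate running character totals with itertools.accumulate, then find the cutoff index and join a prefix slice.
import Mathlib
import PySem

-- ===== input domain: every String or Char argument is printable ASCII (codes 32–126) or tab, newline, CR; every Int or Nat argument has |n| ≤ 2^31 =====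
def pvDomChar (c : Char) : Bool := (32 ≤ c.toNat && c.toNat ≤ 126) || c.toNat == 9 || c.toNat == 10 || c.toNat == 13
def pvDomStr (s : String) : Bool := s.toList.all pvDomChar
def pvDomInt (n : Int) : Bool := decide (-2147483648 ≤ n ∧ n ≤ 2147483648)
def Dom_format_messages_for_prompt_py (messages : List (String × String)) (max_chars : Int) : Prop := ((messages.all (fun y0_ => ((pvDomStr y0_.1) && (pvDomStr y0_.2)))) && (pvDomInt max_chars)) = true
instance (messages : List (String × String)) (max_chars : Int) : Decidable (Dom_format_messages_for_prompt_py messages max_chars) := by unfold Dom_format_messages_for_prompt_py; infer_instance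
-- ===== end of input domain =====

-- B formats all lines, tabulates running totals, then takes the prefix before the first
-- total exceeding max_chars, instead of A's interleaved accumulate-and-break loop (alternative decomposition, same cost).

-- ===== PORT A =====
-- A's loop: accumulate lines while the running length stays within max_chars, break otherwise.
def pvALoop (max_chars : Int) : List (String × String) → Int → List String
  | [], _ => []
  | (role, content) :: rest, length =>
    let line := role ++ ": " ++ content
    if length + PySem.Str.len line > max_chars then []
    else line :: pvALoop max_chars rest (length + PySem.Str.len line)

def format_messages_for_prompt_py (messages : List (String × String)) (max_chars : Int) : String :=
  PySem.Str.join "\n" (pvALoop max_chars messages 0)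

-- ===== PORT B =====
-- itertools.accumulate over the line lengths, starting from a running total `acc`
def pvAccumulate (acc : Int) : List Int → List Int
  | [] => []
  | l :: ls => (acc + l) :: pvAccumulate (acc + l) ls

def format_messages_for_prompt_py_alt (messages : List (String × String)) (max_chars : Int) : String :=
  let lines := messages.map (fun p => p.1 ++ ": " ++ p.2)
  let totals := pvAccumulate 0 (lines.map PySem.Str.len)
  let cutoff := match totals.findIdx? (fun t => decide (t > max_chars)) with
    | some i => i
    | none => lines.length
  PySem.Str.join "\n" (lines.take cutoff)

-- ===== PRECONDITION & SPEC =====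
def Spec_format_messages_for_prompt_py (messages : List (String × String)) (max_chars : Int) (out : String) : Prop := out = format_messages_for_prompt_py_alt messages max_chars
instance (messages : List (String × String)) (max_chars : Int) (out : String) : Decidable (Spec_format_messages_for_prompt_py messages max_chars out) := by unfold Spec_format_messages_for_prompt_py; infer_instance

-- ===== CLAIM (what is proved, stated in full; the proofs are below) =====
def Claim_equal_format_messages_for_prompt_py : Prop := ∀ (messages : List (String × String)) (max_chars : Int), Dom_format_messages_for_prompt_py messages max_chars → Spec_format_messages_for_prompt_py messages max_chars (format_messages_for_prompt_py messages max_chars)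

-- ===== LEMMAS AND PROOFS =====

-- A's break loop equals the prefix of the formatted lines cut at the first running total over max_chars.
theorem pvALoop_eq_take (max_chars : Int) (msgs : List (String × String)) (length : Int) :
    pvALoop max_chars msgs length =
      (msgs.map (fun p => p.1 ++ ": " ++ p.2)).take
        (match (pvAccumulate length ((msgs.map (fun p => p.1 ++ ": " ++ p.2)).map PySem.Str.len)).findIdx?
                 (fun t => decide (t > max_chars)) with
         | some i => i
         | none => msgs.length) := by
  induction msgs generalizing length with
  | nil => simp [pvALoop, pvAccumulate]
  | cons hd tl ih =>
    obtain ⟨role, content⟩ := hd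
    simp only [pvALoop, List.map_cons, pvAccumulate, List.findIdx?_cons]
    split_ifs with h1 h2 h2
    · simp
    · simp at h1 h2; omega
    · simp at h1 h2; omega
    · rw [ih, List.map_map]
      generalize List.findIdx? (fun t => decide (t > max_chars)) _ = o
      cases o <;> simp

-- ===== VERDICT (by name: the statement is the Claim_ definition above) =====
theorem format_messages_for_prompt_py_spec : Claim_equal_format_messages_for_prompt_py := by
  intro messages max_chars _
  show _ = _
  unfold format_messages_for_prompt_py format_messages_for_prompt_py_alt
  rw [pvALoop_eq_take]
  simp
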